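-- pv_equiv track=rewrite | github.com/rlacksals96/algorithm | Programmers/해시/전화번호 목록/phone_num_list.py | solution
-- ===== SOURCE A (Python) =====
-- def solution(phone_book):
--     answer=True
--     hash_map={}
--     for phone_num in phone_book:
--         hash_map[phone_num]=1
--     for phone_num in phone_book:
--         tmp=""
--         for num in phone_num:
--             tmp+=num
--             if tmp in hash_map and tmp!=phone_num:
--                 answer=False
--     return answer
-- ===== SOURCE B (Python) =====
-- def solution(phone_book):
--     a = sorted(phone_book)
--     # only a nonempty entry counts as a (proper-)prefix candidate
--     return not any(x != "" and x != y and y.startswith(x) for x, y in zip(a, a[1:]))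
-- ===== Notes on version B (the rewrite author's own statement) =====
-- stated objective: faster
-- what changed: B sorts the list once and checks only adjacent pairs for a nonempty proper-prefix relation, instead of A's dict of all numbers plus enumeration and hashing of every prefix of every number.
import Mathlib
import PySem

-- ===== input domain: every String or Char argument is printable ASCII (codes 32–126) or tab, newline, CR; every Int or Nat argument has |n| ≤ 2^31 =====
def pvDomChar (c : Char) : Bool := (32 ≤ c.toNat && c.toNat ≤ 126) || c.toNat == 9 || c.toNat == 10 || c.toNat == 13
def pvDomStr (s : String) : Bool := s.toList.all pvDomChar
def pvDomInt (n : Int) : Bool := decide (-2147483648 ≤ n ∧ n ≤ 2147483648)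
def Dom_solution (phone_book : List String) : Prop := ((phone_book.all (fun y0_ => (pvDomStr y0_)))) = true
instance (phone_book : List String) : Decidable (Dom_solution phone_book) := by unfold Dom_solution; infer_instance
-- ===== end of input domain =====

-- B replaces A's hash-of-all-numbers + per-string prefix enumeration by sort-then-adjacent-scan
-- (alternative algorithm); like A, only a nonempty entry counts as a proper-prefix candidate.

-- ===== PORT A =====
-- Strings are handled on the List Char side throughout (PySem convention); the dict is keyed by the character lists.
def solution (phone_book : List String) : Bool :=
  let hash_map : PySem.Dict (List Char) Int :=
    phone_book.foldl (fun d phone_num => d.insert phone_num.toList 1) PySem.Dict.empty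
  (phone_book.foldl
    (fun answer phone_num =>
      (phone_num.toList.foldl
        (fun (st : Bool × List Char) num =>
          let tmp := st.2 ++ [num]
          ((if hash_map.contains tmp = true ∧ tmp ≠ phone_num.toList then false else st.1), tmp))
        (answer, ([] : List Char))).1)
    true)

-- ===== PORT B =====
def solution_alt (phone_book : List String) : Bool :=
  let a := PySem.List.sorted phone_book (fun x => x) false
  !((a.zip (a.drop 1)).any
      (fun xy => decide (xy.1 ≠ "") && decide (xy.1 ≠ xy.2) && PySem.Str.startswith xy.2 xy.1))

-- ===== PRECONDITION & SPEC =====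
def Spec_solution (phone_book : List String) (out : Bool) : Prop := out = solution_alt phone_book
instance (phone_book : List String) (out : Bool) : Decidable (Spec_solution phone_book out) := by unfold Spec_solution; infer_instance

-- ===== CLAIM (what is proved, stated in full; the proofs are below) =====
def Claim_equal_solution : Prop := ∀ (phone_book : List String), Dom_solution phone_book → Spec_solution phone_book (solution phone_book)

-- ===== LEMMAS AND PROOFS =====

-- "some nonempty member of l is a proper prefix of another member"
def Bad (l : List String) : Prop :=
  ∃ p q, p ∈ l ∧ q ∈ l ∧ p ≠ "" ∧ p ≠ q ∧ p.toList <+: q.toList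

-- the nonempty prefixes of acc ++ cs strictly longer than acc (the successive values of A's tmp)
def prefList (acc : List Char) : List Char → List (List Char)
  | [] => []
  | c :: cs => (acc ++ [c]) :: prefList (acc ++ [c]) cs

lemma contains_foldl (l : List String) (d : PySem.Dict (List Char) Int) (t : List Char) :
    ((l.foldl (fun d p => d.insert p.toList 1) d).contains t)
      = (d.contains t || l.any (fun s => t == s.toList)) := by
  induction l generalizing d with
  | nil => simp
  | cons s l ih =>
      simp [List.foldl, ih, PySem.Dict.contains_insert, Bool.or_assoc, Bool.or_left_comm]

lemma inner_spec (hm : PySem.Dict (List Char) Int) (full : List Char) :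
    ∀ (cs : List Char) (b : Bool) (acc : List Char),
    cs.foldl
      (fun (st : Bool × List Char) num =>
        ((if hm.contains (st.2 ++ [num]) = true ∧ st.2 ++ [num] ≠ full then false else st.1),
          st.2 ++ [num])) (b, acc)
      = (b && (prefList acc cs).all (fun t => !(hm.contains t && decide (t ≠ full))), acc ++ cs) := by
  intro cs
  induction cs with
  | nil => intro b acc; simp [prefList]
  | cons c cs ih =>
      intro b acc
      simp only [List.foldl, prefList, List.all_cons]
      rw [ih]
      by_cases h : hm.contains (acc ++ [c]) = true ∧ acc ++ [c] ≠ full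
      · simp [h]
      · have hc : (!hm.contains (acc ++ [c]) || decide (acc ++ [c] = full)) = true := by
          rcases not_and_or.1 h with h1 | h2
          · simp [Bool.eq_false_iff.2 h1]
          · simp [not_not.1 h2]
        simp [if_neg h, hc]

lemma mem_prefList : ∀ (cs acc t : List Char),
    t ∈ prefList acc cs ↔ ∃ ds, ds ≠ [] ∧ ds <+: cs ∧ t = acc ++ ds := by
  intro cs
  induction cs with
  | nil => intro acc t; simp [prefList]
  | cons c cs ih =>
      intro acc t
      simp only [prefList, List.mem_cons, ih]
      constructor
      · rintro (rfl | ⟨ds, hne, hp, rfl⟩)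
        · exact ⟨[c], by simp, by simp⟩
        · exact ⟨c :: ds, by simp, by simpa using hp, by simp⟩
      · rintro ⟨ds, hne, hp, rfl⟩
        match ds, hne with
        | d :: ds', _ =>
          obtain ⟨rfl, hp'⟩ := (List.cons_prefix_cons).1 hp
          rcases ds' with _ | ⟨e, ds''⟩
          · left; simp
          · right; exact ⟨e :: ds'', by simp, hp', by simp⟩

lemma lex_of_prefix_ne : ∀ (p q : List Char), p <+: q → p ≠ q → List.Lex (· < ·) p q := by
  intro p
  induction p with
  | nil =>
      intro q _ hne
      match q, hne with
      | c :: q', _ => exact List.Lex.nil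
  | cons a p' ih =>
      intro q hp hne
      match q, hp with
      | b :: q', hp =>
        obtain ⟨rfl, hp'⟩ := (List.cons_prefix_cons).1 hp
        exact List.Lex.cons (ih q' hp' (by rintro rfl; exact hne rfl))

lemma between_lex : ∀ (p z q : List Char), p <+: q →
    (List.Lex (· < ·) p z ∨ p = z) → (List.Lex (· < ·) z q ∨ z = q) → p <+: z := by
  intro p
  induction p with
  | nil => intro z q _ _ _; exact List.nil_prefix
  | cons a p' ih =>
      intro z q hpq hpz hzq
      rcases hpz with hpz | rfl
      · rcases hzq with hzq | rfl
        · match q, hpq with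
          | b :: q', hpq =>
            obtain ⟨rfl, hpq'⟩ := (List.cons_prefix_cons).1 hpq
            match z, hpz with
            | c :: z', hpz =>
              cases hpz with
              | rel hab =>
                  cases hzq with
                  | rel hba => exact absurd hab (lt_asymm hba)
                  | cons h => exact absurd hab (lt_irrefl _)
              | cons hL =>
                  cases hzq with
                  | rel hba => exact absurd hba (lt_irrefl _)
                  | cons hL' =>
                      exact (List.cons_prefix_cons).2 ⟨rfl, ih z' q' hpq' (Or.inl hL) (Or.inl hL')⟩
        · exact hpq
      · exact List.prefix_refl _

-- adjacent bad pair in a list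
def AdjBad (a : List String) : Prop :=
  ∃ pre x y suf, a = pre ++ x :: y :: suf ∧ x ≠ "" ∧ x ≠ y ∧ x.toList <+: y.toList

lemma mem_zip_tail : ∀ (a : List String) (x y : String),
    (x, y) ∈ a.zip a.tail ↔ ∃ pre suf, a = pre ++ x :: y :: suf := by
  intro a
  induction a with
  | nil => intro x y; simp
  | cons h t ih =>
      intro x y
      cases t with
      | nil =>
          simp only [List.tail_cons, List.zip_nil_right, List.not_mem_nil, false_iff]
          rintro ⟨pre, suf, heq⟩
          rcases pre with _ | ⟨p, pre'⟩ <;> simp_all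
      | cons h2 t2 =>
          simp only [List.tail_cons, List.zip_cons_cons, List.mem_cons, Prod.mk.injEq]
          constructor
          · rintro (⟨rfl, rfl⟩ | hmem)
            · exact ⟨[], t2, rfl⟩
            · obtain ⟨pre, suf, heq⟩ := (ih x y).1 (by simpa using hmem)
              exact ⟨h :: pre, suf, by simp [heq]⟩
          · rintro ⟨pre, suf, heq⟩
            rcases pre with _ | ⟨p, pre'⟩
            · simp_all
            · right
              simp only [List.cons_append, List.cons.injEq] at heq
              obtain ⟨rfl, ht⟩ := heq
              exact (by simpa using (ih x y).2 ⟨pre', suf, ht⟩)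

lemma chain_lemma (a : List String) (h : a.Pairwise (· ≤ ·)) :
    ∀ p q : String, p ∈ a → q ∈ a → p ≠ "" → p ≠ q → p.toList <+: q.toList → AdjBad a := by
  induction a with
  | nil => intro p q hp; simp at hp
  | cons z t ih =>
      intro p q hp hq hne0 hne hpre
      have hz : ∀ w ∈ t, z ≤ w := (List.pairwise_cons.1 h).1
      have ht : t.Pairwise (· ≤ ·) := (List.pairwise_cons.1 h).2
      have hplt : p < q := (String.lt_iff_toList_lt).2 (lex_of_prefix_ne _ _ hpre (fun he => hne (String.toList_inj.mp he)))
      rcases List.mem_cons.1 hp with rfl | hpt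
      · -- p = z
        have hqt : q ∈ t := by
          rcases List.mem_cons.1 hq with rfl | hqt
          · exact absurd hplt (lt_irrefl _)
          · exact hqt
        match t, hqt with
        | w :: t', hqt =>
          by_cases hzw : p = w
          · -- duplicate head: both p and q are in the tail
            obtain ⟨pre, x, y, suf, heq, hx0, hxy, hxyp⟩ :=
              ih ht p q (hzw ▸ List.mem_cons_self) hqt hne0 hne hpre
            exact ⟨p :: pre, x, y, suf, by simp [heq], hx0, hxy, hxyp⟩
          · -- head differs from its successor: (p, w) is an adjacent bad pair
            have hwq : w ≤ q := by
              rcases List.mem_cons.1 hqt with rfl | hqt'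
              · exact le_refl _
              · exact (List.pairwise_cons.1 ht).1 q hqt'
            have hpw : p ≤ w := hz w List.mem_cons_self
            have hpw' : p.toList <+: w.toList := by
              apply between_lex p.toList w.toList q.toList hpre
              · rcases lt_or_eq_of_le hpw with hlt | he
                · exact Or.inl ((String.lt_iff_toList_lt).1 hlt)
                · exact Or.inr (by rw [he])
              · rcases lt_or_eq_of_le hwq with hlt | he
                · exact Or.inl ((String.lt_iff_toList_lt).1 hlt)
                · exact Or.inr (by rw [he])
            exact ⟨[], p, w, t', rfl, hne0, hzw, hpw'⟩
      · rcases List.mem_cons.1 hq with rfl | hqt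
        · -- q = z, p ∈ t: contradicts sortedness
          exact absurd hplt (not_lt_of_ge (hz p hpt))
        · obtain ⟨pre, x, y, suf, heq, hx0, hxy, hxyp⟩ := ih ht p q hpt hqt hne0 hne hpre
          exact ⟨z :: pre, x, y, suf, by simp [heq], hx0, hxy, hxyp⟩

lemma foldl_and (g : String → Bool) (l : List String) : ∀ b,
    l.foldl (fun a q => a && g q) b = (b && l.all g) := by
  induction l with
  | nil => intro b; simp
  | cons q l ih => intro b; simp [List.foldl, ih, Bool.and_assoc]

lemma A_true_iff (l : List String) : solution l = true ↔ ¬ Bad l := by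
  have key : solution l
      = l.all (fun q => (prefList [] q.toList).all
          (fun t => !((l.any (fun s => t == s.toList)) && decide (t ≠ q.toList)))) := by
    have hc : ∀ t : List Char,
        (l.foldl (fun (d : PySem.Dict (List Char) Int) p => d.insert p.toList 1)
            PySem.Dict.empty).contains t
          = l.any (fun s => t == s.toList) := by
      intro t; rw [contains_foldl]; simp
    have hfun : (fun (answer : Bool) (phone_num : String) =>
        (phone_num.toList.foldl
          (fun (st : Bool × List Char) num =>
            ((if (l.foldl (fun (d : PySem.Dict (List Char) Int) p => d.insert p.toList 1)
                    PySem.Dict.empty).contains (st.2 ++ [num]) = true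
                ∧ st.2 ++ [num] ≠ phone_num.toList then false else st.1), st.2 ++ [num]))
          (answer, ([] : List Char))).1)
        = fun (answer : Bool) (q : String) => answer && (prefList [] q.toList).all
            (fun t => !((l.any (fun s => t == s.toList)) && decide (t ≠ q.toList))) := by
      funext ans q
      rw [inner_spec]
      simp only [hc]
    simp only [solution]
    rw [hfun, foldl_and]
    simp
  rw [key]
  simp only [List.all_eq_true, Bool.not_eq_eq_eq_not, Bool.not_true, Bool.and_eq_false_imp,
    decide_eq_false_iff_not, not_not, List.any_eq_true, beq_iff_eq]
  constructor
  · intro hall hbad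
    obtain ⟨p, q, hp, hq, hne0, hne, hpre'⟩ := hbad
    have hpnil : p.toList ≠ [] := by
      intro h0
      exact hne0 (String.toList_inj.mp (by simp [h0]))
    have hmem : p.toList ∈ prefList [] q.toList :=
      (mem_prefList _ _ _).2 ⟨p.toList, hpnil, hpre', rfl⟩
    have := hall q hq p.toList hmem ⟨p, hp, rfl⟩
    exact hne (String.toList_inj.mp this)
  · intro hnb q hq t hmem hex
    obtain ⟨s, hs, hst⟩ := hex
    by_contra hne
    obtain ⟨ds, hd0, hdp, hdt⟩ := (mem_prefList _ _ _).1 hmem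
    have htq : t <+: q.toList := by simpa [hdt] using hdp
    have hs0 : s ≠ "" := by
      intro h0
      apply hd0
      have : t = [] := by rw [hst, h0]; rfl
      simpa [this] using hdt
    exact hnb ⟨s, q, hs, hq, hs0, fun he => hne (by rw [hst, he]), by rw [← hst]; exact htq⟩

lemma B_true_iff (l : List String) : solution_alt l = true ↔ ¬ Bad l := by
  have hmem : ∀ x, x ∈ PySem.List.sorted l (fun x => x) false ↔ x ∈ l :=
    fun x => PySem.List.mem_sorted l _ false x
  have hpw : (PySem.List.sorted l (fun x => x) false).Pairwise (· ≤ ·) :=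
    PySem.List.sorted_pairwise l (fun x => x)
  have hiff : ((PySem.List.sorted l (fun x => x) false).zip
        ((PySem.List.sorted l (fun x => x) false).drop 1)).any
        (fun xy => decide (xy.1 ≠ "") && decide (xy.1 ≠ xy.2) && PySem.Str.startswith xy.2 xy.1)
          = true ↔ Bad l := by
    rw [List.any_eq_true]
    constructor
    · rintro ⟨⟨x, y⟩, hmemz, hp⟩
      rw [List.drop_one] at hmemz
      obtain ⟨pre, suf, heq⟩ := (mem_zip_tail _ x y).1 hmemz
      simp only [Bool.and_eq_true, decide_eq_true_eq] at hp
      have hpre : x.toList <+: y.toList := by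
        refine (PySem.Chars.startswith_iff _ _).1 ?_
        rw [← PySem.Str.startswith_eq]
        exact hp.2
      have hx : x ∈ PySem.List.sorted l (fun x => x) false := by rw [heq]; simp
      have hy : y ∈ PySem.List.sorted l (fun x => x) false := by rw [heq]; simp
      exact ⟨x, y, (hmem x).1 hx, (hmem y).1 hy, hp.1.1, hp.1.2, hpre⟩
    · rintro ⟨p, q, hp, hq, hne0, hne, hpre⟩
      obtain ⟨pre, x, y, suf, heq, hx0, hxy, hxp⟩ :=
        chain_lemma _ hpw p q ((hmem p).2 hp) ((hmem q).2 hq) hne0 hne hpre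
      refine ⟨(x, y), ?_, ?_⟩
      · rw [List.drop_one]
        exact (mem_zip_tail _ x y).2 ⟨pre, suf, heq⟩
      · have hsw : PySem.Chars.startswith y.toList x.toList = true :=
          (PySem.Chars.startswith_iff _ _).2 hxp
        simp [hx0, hxy, hsw]
  simp only [solution_alt]
  rw [Bool.not_eq_true', Bool.eq_false_iff]
  exact not_congr hiff

-- ===== VERDICT (by name: the statement is the Claim_ definition above) =====
theorem solution_spec : Claim_equal_solution := by
  intro l _
  unfold Spec_solution
  rw [Bool.eq_iff_iff, A_true_iff l, B_true_iff l]
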